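-- pv_equiv track=rewrite | github.com/LePhanFF/RockitFactory | packages/rockit-core/src/rockit_core/deterministic/modules/tape_context.py | _cluster_touches
-- ===== SOURCE A (Python) =====
-- def _cluster_touches(touch_index, min_gap_bars=5):
--     """Group consecutive touching bars into distinct touch events."""
--     if len(touch_index) == 0:
--         return []
--
--     events = [touch_index[0]]
--     last_event_idx = 0
--
--     for i in range(1, len(touch_index)):
--         # If this bar is far enough from the last event's start, it's a new event
--         bars_since_last = i - last_event_idx
--         if bars_since_last >= min_gap_bars:
--             events.append(touch_index[i])
--             last_event_idx = i
--
--     return events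
-- ===== SOURCE B (Python) =====
-- def _cluster_touches(touch_index, min_gap_bars=5):
--     """Group consecutive touching bars into distinct touch events."""
--     # The greedy distance test first fires exactly every max(min_gap_bars, 1)
--     # bars, so the selected positions are simply 0, step, 2*step, ...
--     step = max(min_gap_bars, 1)
--     return [touch_index[i] for i in range(0, len(touch_index), step)]
-- ===== Notes on version B (the rewrite author's own statement) =====
-- stated objective: simpler
-- what changed: Replaces the stateful greedy loop (events list + last_event_idx, distance test per bar) with a closed form: the test fires exactly every max(min_gap_bars,1) bars, so B is a single strided-range comprehension picking positions 0, step, 2*step, ...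
import Mathlib
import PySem

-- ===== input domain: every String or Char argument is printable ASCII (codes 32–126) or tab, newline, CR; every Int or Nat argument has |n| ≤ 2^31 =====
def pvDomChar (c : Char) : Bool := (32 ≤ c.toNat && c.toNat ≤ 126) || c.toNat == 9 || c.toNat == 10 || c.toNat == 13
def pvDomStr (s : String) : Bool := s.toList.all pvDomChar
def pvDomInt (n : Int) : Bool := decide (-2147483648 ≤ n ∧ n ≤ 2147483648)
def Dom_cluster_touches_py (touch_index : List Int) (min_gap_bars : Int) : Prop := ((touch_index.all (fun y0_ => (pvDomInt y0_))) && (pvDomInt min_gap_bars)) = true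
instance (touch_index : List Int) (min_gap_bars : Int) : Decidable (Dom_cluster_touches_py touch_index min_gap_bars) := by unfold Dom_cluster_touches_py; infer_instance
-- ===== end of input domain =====

-- ===== PORT A =====
-- literal port of A: greedy loop keeping (events, last_event_idx)
def cluster_touches_py (touch_index : List Int) (min_gap_bars : Int) : List Int :=
  if touch_index.length = 0 then []
  else
    ((PySem.List.pyRange 1 (touch_index.length : Int) 1).foldl
      (fun (st : List Int × Int) i =>
        let bars_since_last := i - st.2
        if min_gap_bars ≤ bars_since_last then
          (st.1 ++ [PySem.List.pyGetD touch_index i 0], i)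
        else st)
      ([PySem.List.pyGetD touch_index 0 0], 0)).1

-- ===== PORT B =====
-- B: the distance test fires exactly every max(min_gap_bars,1) bars, so the
-- result is the strided comprehension over range(0, len, step).
def cluster_touches_py_alt (touch_index : List Int) (min_gap_bars : Int) : List Int :=
  let step := max min_gap_bars 1
  (PySem.List.pyRange 0 (touch_index.length : Int) step).map
    (fun i => PySem.List.pyGetD touch_index i 0)

-- ===== PRECONDITION & SPEC =====
def Spec_cluster_touches_py (touch_index : List Int) (min_gap_bars : Int) (out : List Int) : Prop := out = cluster_touches_py_alt touch_index min_gap_bars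
instance (touch_index : List Int) (min_gap_bars : Int) (out : List Int) : Decidable (Spec_cluster_touches_py touch_index min_gap_bars out) := by unfold Spec_cluster_touches_py; infer_instance

-- ===== CLAIM (what is proved, stated in full; the proofs are below) =====
def Claim_equal_cluster_touches_py : Prop := ∀ (touch_index : List Int) (min_gap_bars : Int), Dom_cluster_touches_py touch_index min_gap_bars → Spec_cluster_touches_py touch_index min_gap_bars (cluster_touches_py touch_index min_gap_bars)

-- ===== LEMMAS AND PROOFS =====

lemma pyRange_pos_nil (a b s : Int) (hs : 0 < s) (h : b ≤ a) :
    PySem.List.pyRange a b s = [] := by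
  rw [PySem.List.pyRange_of_pos a b hs]
  have hab : ¬ a < b := not_lt.mpr h
  simp [hab]

lemma pyRange_pos_cons (a b s : Int) (hs : 0 < s) (h : a < b) :
    PySem.List.pyRange a b s = a :: PySem.List.pyRange (a + s) b s := by
  rw [PySem.List.pyRange_of_pos a b hs, PySem.List.pyRange_of_pos (a + s) b hs]
  have e1 : b - a + s - 1 = (b - a - 1) + 1 * s := by ring
  have e2 : b - (a + s) + s - 1 = b - a - 1 := by ring
  have h1 : (b - a + s - 1) / s = (b - a - 1) / s + 1 := by
    rw [e1, Int.add_mul_ediv_right _ _ (ne_of_gt hs)]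
  have hnn : 0 ≤ (b - a - 1) / s := Int.ediv_nonneg (by omega) (by omega)
  by_cases hb : a + s < b
  · have e3 : ((b - a + s - 1) / s).toNat = ((b - a - 1) / s).toNat + 1 := by
      rw [h1]; omega
    simp only [if_pos h, if_pos hb, e2, e3, List.range_succ_eq_map, List.map_cons,
      List.map_map]
    congr 1
    · push_cast; ring
    · apply List.map_congr_left
      intro k _
      simp only [Function.comp_apply]
      push_cast
      ring
  · have hz : (b - a - 1) / s = 0 := Int.ediv_eq_zero_of_lt (by omega) (by omega)
    have e3 : ((b - a + s - 1) / s).toNat = 1 := by rw [h1, hz]; rfl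
    simp only [if_pos h, if_neg hb, e3, List.range_one, List.map_cons, List.map_nil,
      List.range_zero]
    congr 1
    push_cast; ring

-- fold invariant for A's loop: starting with last-event index l, with the next
-- index a within one stride of l, the loop appends exactly the elements at
-- positions l + s, l + 2s, … (s = max min_gap_bars 1)
lemma foldA (ti : List Int) (mg : Int) (n : Nat) :
    ∀ (b a l : Int) (acc : List Int), (b - a).toNat = n → l < a → a ≤ l + max mg 1 →
    ((PySem.List.pyRange a b 1).foldl
      (fun (st : List Int × Int) i =>
        let bars_since_last := i - st.2
        if mg ≤ bars_since_last then
          (st.1 ++ [PySem.List.pyGetD ti i 0], i)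
        else st)
      (acc, l)).1
    = acc ++ (PySem.List.pyRange (l + max mg 1) b (max mg 1)).map
        (fun i => PySem.List.pyGetD ti i 0) := by
  induction n with
  | zero =>
    intro b a l acc hn hla hal
    have hba : b ≤ a := by omega
    rw [PySem.List.pyRange_one_eq_nil hba,
      pyRange_pos_nil _ _ _ (by omega) (by omega)]
    simp
  | succ n ih =>
    intro b a l acc hn hla hal
    have hab : a < b := by omega
    rw [PySem.List.pyRange_one_cons hab]
    simp only [List.foldl_cons]
    by_cases he : a = l + max mg 1
    · have hcond : mg ≤ a - l := by omega
      simp only [if_pos hcond]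
      rw [ih b (a + 1) a (acc ++ [PySem.List.pyGetD ti a 0]) (by omega) (by omega)
        (by omega)]
      rw [pyRange_pos_cons (l + max mg 1) b (max mg 1) (by omega) (by omega)]
      simp [he, List.append_assoc]
    · have hcond : ¬ mg ≤ a - l := by omega
      simp only [if_neg hcond]
      exact ih b (a + 1) l acc (by omega) (by omega) (by omega)

-- ===== VERDICT (by name: the statement is the Claim_ definition above) =====
theorem cluster_touches_py_spec : Claim_equal_cluster_touches_py := by
  intro ti mg _
  unfold Spec_cluster_touches_py cluster_touches_py cluster_touches_py_alt
  by_cases hn : ti.length = 0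
  · rw [if_pos hn, hn]
    dsimp only
    rw [Nat.cast_zero, pyRange_pos_nil 0 0 (max mg 1) (by omega) (by omega)]
    simp
  · rw [if_neg hn]
    dsimp only
    have h0 : (0 : Int) < (ti.length : Int) := by
      exact_mod_cast Nat.pos_of_ne_zero hn
    rw [foldA ti mg ((ti.length : Int) - 1).toNat (ti.length : Int) 1 0
      [PySem.List.pyGetD ti 0 0] (by omega) (by omega) (by omega)]
    rw [pyRange_pos_cons 0 (ti.length : Int) (max mg 1) (by omega) h0]
    simp
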